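-- pv_equiv track=rewrite | github.com/RealMH-01/order-audit-system-Neo-Brutalism | backend/app/services/evidence_locator/resolver.py | _merged_ranges_by_sheet
-- ===== SOURCE A (Python) =====
-- def _merged_ranges_by_sheet(file_index: list[dict]) -> dict[str, list[str]]:
--     merged: dict[str, list[str]] = {}
--     for record in file_index:
--         merged_range = record.get("merged_range")
--         sheet = str(record.get("sheet") or "")
--         if sheet and merged_range:
--             ranges = merged.setdefault(sheet, [])
--             if str(merged_range) not in ranges:
--                 ranges.append(str(merged_range))
--     return merged
-- ===== SOURCE B (Python) =====
-- def _valid_pair(record):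
--     merged_range = record.get("merged_range")
--     sheet = str(record.get("sheet") or "")
--     if sheet and merged_range:
--         return (sheet, str(merged_range))
--     return None
--
--
-- def _merged_ranges_by_sheet(file_index: list[dict]) -> dict[str, list[str]]:
--     # Flatten to a filtered (sheet, range) pair list; no dict during traversal.
--     pairs = [p for p in map(_valid_pair, file_index) if p is not None]
--     # Sheet order = first-seen order of sheet names among the valid pairs.
--     sheets = dict.fromkeys(s for s, _ in pairs)
--     # One entry per sheet: its ranges in order, deduplicated keeping first occurrences.
--     return {s: list(dict.fromkeys(r for s2, r in pairs if s2 == s)) for s in sheets}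
-- ===== Notes on version B (the rewrite author's own statement) =====
-- stated objective: alternative
-- what changed: Replaced A's single pass that incrementally builds a dict with setdefault and a membership check per append by a dict-free pipeline: flatten records to a filtered (sheet, range) pair list, derive the sheet order by deduplicating the pair firsts, then build each sheet's value by a per-sheet filter plus dict.fromkeys dedup.
import Mathlib
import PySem

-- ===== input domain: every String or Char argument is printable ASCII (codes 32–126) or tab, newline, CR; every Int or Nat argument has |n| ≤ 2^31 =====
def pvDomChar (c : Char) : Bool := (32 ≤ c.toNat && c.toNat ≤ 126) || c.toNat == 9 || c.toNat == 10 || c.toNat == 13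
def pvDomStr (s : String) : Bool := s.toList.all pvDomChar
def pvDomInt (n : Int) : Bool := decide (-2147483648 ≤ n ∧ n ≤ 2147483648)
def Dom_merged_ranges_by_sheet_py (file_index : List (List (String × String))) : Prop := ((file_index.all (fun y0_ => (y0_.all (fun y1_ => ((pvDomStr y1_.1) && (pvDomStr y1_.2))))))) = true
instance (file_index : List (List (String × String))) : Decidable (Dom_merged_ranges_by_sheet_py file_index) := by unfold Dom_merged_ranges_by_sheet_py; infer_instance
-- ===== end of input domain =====

-- B replaces A's incremental dict building (setdefault + membership test per record) by a dict-free
-- pipeline: filtered pair list, dedup of the sheet names, then per-sheet filter + dedup (alternative decomposition, same cost).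

-- ===== PORT A =====
-- record.get(k) on the record dict (first-match association-list lookup)
def pvRecGet (record : List (String × String)) (k : String) : Option String :=
  (PySem.Dict.mk record).get? k

-- one iteration of A's loop body
def pvStepA (merged : PySem.Dict String (List String)) (record : List (String × String)) :
    PySem.Dict String (List String) :=
  let merged_range := pvRecGet record "merged_range"
  let sheet := (pvRecGet record "sheet").getD ""
  match merged_range with
  | none => merged
  | some r =>
      if sheet ≠ "" ∧ r ≠ "" then
        let m := merged.setdefault sheet []
        let ranges := m.getD sheet []
        if r ∈ ranges then m else m.modify sheet [] (fun l => l ++ [r])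
      else merged

def merged_ranges_by_sheet_py (file_index : List (List (String × String))) : List (String × List String) :=
  (file_index.foldl pvStepA PySem.Dict.empty).items

-- ===== PORT B =====
-- _valid_pair: the guarded extraction of one record's (sheet, str(merged_range)), None when skipped
def pvValidPair (record : List (String × String)) : Option (String × String) :=
  match (PySem.Dict.mk record).get? "merged_range" with
  | none => none
  | some merged_range =>
      let sheet := ((PySem.Dict.mk record).get? "sheet").getD ""
      if sheet ≠ "" ∧ merged_range ≠ "" then some (sheet, merged_range) else none

-- pairs comprehension, then dict.fromkeys sheet order, then one dedup'd entry per sheet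
def merged_ranges_by_sheet_py_alt (file_index : List (List (String × String))) : List (String × List String) :=
  let pairs := file_index.filterMap pvValidPair
  (PySem.List.dedup (pairs.map Prod.fst)).map
    (fun s => (s, PySem.List.dedup ((pairs.filter (fun p => p.1 == s)).map Prod.snd)))

-- ===== PRECONDITION & SPEC =====
def Spec_merged_ranges_by_sheet_py (file_index : List (List (String × String))) (out : List (String × List String)) : Prop := out = merged_ranges_by_sheet_py_alt file_index
instance (file_index : List (List (String × String))) (out : List (String × List String)) : Decidable (Spec_merged_ranges_by_sheet_py file_index out) := by unfold Spec_merged_ranges_by_sheet_py; infer_instance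

-- ===== CLAIM (what is proved, stated in full; the proofs are below) =====
def Claim_equal_merged_ranges_by_sheet_py : Prop := ∀ (file_index : List (List (String × String))), Dom_merged_ranges_by_sheet_py file_index → Spec_merged_ranges_by_sheet_py file_index (merged_ranges_by_sheet_py file_index)

-- ===== LEMMAS AND PROOFS =====

-- the pair-level step A's loop body performs once the guard has fired
def pvAdd (m : PySem.Dict String (List String)) (s r : String) : PySem.Dict String (List String) :=
  if r ∈ (m.setdefault s []).getD s [] then m.setdefault s []
  else (m.setdefault s []).modify s [] (fun l => l ++ [r])

theorem pvStepA_eq (m : PySem.Dict String (List String)) (record : List (String × String)) :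
    pvStepA m record = match pvValidPair record with
      | none => m
      | some p => pvAdd m p.1 p.2 := by
  unfold pvStepA pvValidPair pvRecGet
  cases (PySem.Dict.mk record).get? "merged_range" with
  | none => rfl
  | some r =>
      by_cases h : ((PySem.Dict.mk record).get? "sheet").getD "" ≠ "" ∧ r ≠ ""
      · simp only [if_pos h]; rfl
      · simp only [if_neg h]

theorem pvFoldl_filterMap (l : List (List (String × String)))
    (m : PySem.Dict String (List String)) :
    l.foldl pvStepA m = (l.filterMap pvValidPair).foldl (fun d p => pvAdd d p.1 p.2) m := by
  induction l generalizing m with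
  | nil => rfl
  | cons rec rest ih =>
      rw [List.foldl_cons, pvStepA_eq, List.filterMap_cons]
      cases pvValidPair rec with
      | none => exact ih m
      | some p => rw [List.foldl_cons]; exact ih _

-- the shape B computes, as a function of the pair list
def pvSpecOf (pairs : List (String × String)) : List (String × List String) :=
  (PySem.List.dedup (pairs.map Prod.fst)).map
    (fun s => (s, PySem.List.dedup ((pairs.filter (fun p => p.1 == s)).map Prod.snd)))

theorem pvOfList_append_singleton (v : List String) (r : String) :
    PySem.Set.ofList (v ++ [r]) =
      if r ∈ v then PySem.Set.ofList v else PySem.Set.ofList v ++ [r] := by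
  rw [PySem.Set.ofList_append_singleton, PySem.Set.add]
  by_cases h : r ∈ v <;> simp [h]

theorem pvFoldAdd_items (pairs : List (String × String)) :
    ((pairs.foldl (fun d p => pvAdd d p.1 p.2) PySem.Dict.empty).items) = pvSpecOf pairs := by
  induction pairs using List.reverseRecOn with
  | nil => rfl
  | append_singleton ps p ih =>
      obtain ⟨s, r⟩ := p
      rw [List.foldl_append, List.foldl_cons, List.foldl_nil]
      set m := ps.foldl (fun d p => pvAdd d p.1 p.2) PySem.Dict.empty with hm
      -- facts about m from ih
      have hkeys : m.keys = PySem.List.dedup (ps.map Prod.fst) := by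
        show m.items.map Prod.fst = _
        rw [ih]; unfold pvSpecOf; rw [List.map_map]; exact List.map_id _
      have hnd : m.keys.Nodup := by
        rw [hkeys]; simp only [PySem.List.dedup_eq_ofList]; exact PySem.Set.nodup_ofList _
      have hcontains : m.contains s = decide (s ∈ ps.map Prod.fst) := by
        rw [PySem.Dict.contains_eq_decide_mem_keys, hkeys]
        simp [PySem.List.dedup_eq_ofList, PySem.Set.mem_ofList]
      have hfil : ∀ t : String, List.filter (fun p : String × String => p.1 == t) [(s, r)] =
          if s = t then [(s, r)] else [] := by
        intro t
        by_cases h : s = t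
        · subst h; simp [List.filter]
        · have hb : (s == t) = false := by simpa using h
          simp [List.filter, hb, h]
      unfold pvSpecOf
      simp only [List.map_append, List.filter_append, List.map_cons, List.map_nil]
      by_cases hs : s ∈ ps.map Prod.fst
      · -- existing sheet: sheet list unchanged, only s's entry may grow
        have hc : m.contains s = true := by rw [hcontains]; simp [hs]
        set V := PySem.List.dedup ((ps.filter (fun p => p.1 == s)).map Prod.snd) with hV
        have hmemV : (s, V) ∈ m.items := by
          rw [ih]; unfold pvSpecOf
          exact List.mem_map_of_mem (by rw [PySem.List.mem_dedup]; exact hs)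
        have hget : m.get? s = some V := PySem.Dict.get?_of_mem_items m hmemV hnd
        have hgetD : m.getD s [] = V := PySem.Dict.getD_of_get?_eq_some _ _ hget
        have hded : PySem.List.dedup (ps.map Prod.fst ++ [s]) = PySem.List.dedup (ps.map Prod.fst) := by
          simp only [PySem.List.dedup_eq_ofList, pvOfList_append_singleton, hs, if_pos]
        unfold pvAdd
        rw [PySem.Dict.setdefault_of_contains _ _ hc]
        simp only [hgetD]
        by_cases hr : r ∈ V
        · rw [if_pos hr, ih]
          unfold pvSpecOf
          rw [hded]
          refine List.map_congr_left ?_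
          intro t ht
          by_cases hts : s = t
          · subst hts
            rw [hfil, if_pos rfl]
            simp only [List.map_cons, List.map_nil]
            congr 1
            simp only [PySem.List.dedup_eq_ofList] at hV ⊢
            rw [pvOfList_append_singleton,
              if_pos ((PySem.Set.mem_ofList _ _).mp (hV ▸ hr)), ← hV]
          · rw [hfil, if_neg hts]
            simp
        · rw [if_neg hr]
          have hmod : m.modify s [] (fun l => l ++ [r]) = m.insert s (V ++ [r]) := by
            unfold PySem.Dict.modify; rw [hgetD]
          rw [hmod, PySem.Dict.items_insert_of_contains _ _ hc, ih]
          unfold pvSpecOf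
          rw [hded, List.map_map]
          refine List.map_congr_left ?_
          intro t ht
          by_cases hts : s = t
          · subst hts
            simp only [Function.comp_apply, beq_self_eq_true, if_true]
            rw [hfil, if_pos rfl]
            simp only [List.map_cons, List.map_nil]
            congr 1
            simp only [PySem.List.dedup_eq_ofList] at hV ⊢
            rw [pvOfList_append_singleton,
              if_neg (fun hmem => hr (hV ▸ (PySem.Set.mem_ofList _ _).mpr hmem)), ← hV]
          · have hb : (t == s) = false := by simpa using (fun h => hts h.symm)
            simp only [Function.comp_apply, hb, Bool.false_eq_true, if_false]
            rw [hfil, if_neg hts]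
            simp
      · -- new sheet: appended at the end with the single range [r]
        have hc : m.contains s = false := by rw [hcontains]; simp [hs]
        have hfilps : ps.filter (fun p => p.1 == s) = [] := by
          rw [List.filter_eq_nil_iff]
          intro p hp hps
          have hp1 : p.1 = s := by simpa using hps
          exact hs (hp1 ▸ List.mem_map_of_mem (f := Prod.fst) hp)
        unfold pvAdd
        rw [PySem.Dict.setdefault_of_not_contains _ _ hc]
        rw [PySem.Dict.getD_insert_self]
        rw [if_neg (by simp)]
        have hmod : (m.insert s []).modify s [] (fun l => l ++ [r]) = m.insert s [r] := by
          unfold PySem.Dict.modify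
          rw [PySem.Dict.getD_insert_self, PySem.Dict.insert_insert_self]
          rfl
        rw [hmod, PySem.Dict.items_insert_of_not_contains _ _ hc, ih]
        have hded : PySem.List.dedup (ps.map Prod.fst ++ [s]) =
            PySem.List.dedup (ps.map Prod.fst) ++ [s] := by
          simp only [PySem.List.dedup_eq_ofList, pvOfList_append_singleton, hs, ite_false]
        unfold pvSpecOf
        rw [hded, List.map_append, List.map_cons, List.map_nil]
        congr 1
        · refine (List.map_congr_left ?_).symm
          intro t ht
          have ht' : t ∈ ps.map Prod.fst := by
            simpa [PySem.List.dedup_eq_ofList, PySem.Set.mem_ofList] using ht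
          have hts : s ≠ t := fun h => hs (h ▸ ht')
          rw [hfil, if_neg hts]
          simp
        · rw [hfilps, hfil, if_pos rfl]
          simp [PySem.List.dedup, PySem.Set.ofList, PySem.Set.add]

-- ===== VERDICT (by name: the statement is the Claim_ definition above) =====
theorem merged_ranges_by_sheet_py_spec : Claim_equal_merged_ranges_by_sheet_py := by
  intro file_index _
  unfold Spec_merged_ranges_by_sheet_py merged_ranges_by_sheet_py merged_ranges_by_sheet_py_alt
  rw [pvFoldl_filterMap, pvFoldAdd_items]
  rfl
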